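-- pv_equiv track=rewrite | github.com/pedrohfsantos/ValidadorPython | Modulos/Class/Ajustador/TituloDuplicado.py | duplicado
-- ===== SOURCE A (Python) =====
-- def duplicado(array):
--
-- 	texto = array
-- 	contagem = dict()
--
-- 	for linha in texto:
--
-- 	    palavra = linha.strip()
--
-- 	    if palavra not in contagem.keys():
-- 	        contagem[palavra] = 1
-- 	    else:
-- 	        contagem[palavra] += 1
--
-- 	for Max in contagem.keys():
-- 		if contagem[Max] > 1:
-- 			return Max
-- ===== SOURCE B (Python) =====
-- def duplicado(array):
--     seen = set()
--     dups = set()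
--     for linha in array:
--         palavra = linha.strip()
--         if palavra in seen:
--             dups.add(palavra)
--         else:
--             seen.add(palavra)
--     for linha in array:
--         palavra = linha.strip()
--         if palavra in dups:
--             return palavra
-- ===== Notes on version B (the rewrite author's own statement) =====
-- stated objective: alternative
-- what changed: Replaces the integer-count dictionary and the scan over its key table by two membership sets (seen/duplicates) built in one pass, with the answer found by re-scanning the original input list instead of the dict keys.
import Mathlib
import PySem

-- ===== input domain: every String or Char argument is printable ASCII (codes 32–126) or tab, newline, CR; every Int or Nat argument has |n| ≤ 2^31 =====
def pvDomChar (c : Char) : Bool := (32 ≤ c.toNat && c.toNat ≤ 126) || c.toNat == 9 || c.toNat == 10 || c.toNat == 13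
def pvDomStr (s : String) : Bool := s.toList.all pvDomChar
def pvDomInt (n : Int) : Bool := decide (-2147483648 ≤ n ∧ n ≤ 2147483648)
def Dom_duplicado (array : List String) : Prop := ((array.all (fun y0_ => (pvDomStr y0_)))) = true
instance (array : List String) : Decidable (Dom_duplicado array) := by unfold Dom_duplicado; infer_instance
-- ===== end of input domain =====

-- B replaces A's count dictionary (and the scan over its key table) by two membership
-- sets built in one pass plus a re-scan of the original list: an alternative decomposition.

-- B replaces A's count dictionary (and the scan over its key table) by two membership
-- sets built in one pass plus a rescan of the original list: an alternative decomposition.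

-- ===== PORT A =====
-- helper: the second loop 'for Max in contagem.keys(): if contagem[Max] > 1: return Max'
def duplicadoLoop (d : PySem.Dict String Int) : List String → Option String
  | [] => none
  | k :: ks => if 1 < d.getD k 0 then some k else duplicadoLoop d ks

def duplicado (array : List String) : Option String :=
  let contagem := array.foldl
    (fun d linha =>
      let palavra := PySem.Str.strip linha
      if palavra ∉ d.keys then d.insert palavra 1
      else d.insert palavra (d.getD palavra 0 + 1))
    PySem.Dict.empty
  duplicadoLoop contagem contagem.keys

-- ===== PORT B =====
-- helper: the second loop 'for linha in array: ... if palavra in dups: return palavra'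
def duplicadoScan (dups : PySem.Set String) : List String → Option String
  | [] => none
  | linha :: rest =>
      let palavra := PySem.Str.strip linha
      if palavra ∈ dups then some palavra else duplicadoScan dups rest

def duplicado_alt (array : List String) : Option String :=
  let st := array.foldl
    (fun (st : PySem.Set String × PySem.Set String) linha =>
      let palavra := PySem.Str.strip linha
      if palavra ∈ st.1 then (st.1, PySem.Set.add st.2 palavra)
      else (PySem.Set.add st.1 palavra, st.2))
    (PySem.Set.empty, PySem.Set.empty)
  duplicadoScan st.2 array

-- ===== PRECONDITION & SPEC =====
def Spec_duplicado (array : List String) (out : Option String) : Prop := out = duplicado_alt array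
instance (array : List String) (out : Option String) : Decidable (Spec_duplicado array out) := by unfold Spec_duplicado; infer_instance

-- ===== CLAIM (what is proved, stated in full; the proofs are below) =====
def Claim_equal_duplicado : Prop := ∀ (array : List String), Dom_duplicado array → Spec_duplicado array (duplicado array)

-- ===== LEMMAS AND PROOFS =====

-- A's update step is exactly the Counter step
theorem dup_stepA_eq (d : PySem.Dict String Int) (w : String) :
    (if w ∉ d.keys then d.insert w 1 else d.insert w (d.getD w 0 + 1))
      = d.modify w 0 (· + 1) := by
  by_cases h : w ∈ d.keys
  · simp only [h, not_true_eq_false, if_false]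
    simp [PySem.Dict.modify, PySem.Dict.insert, PySem.Dict.getD, PySem.Dict.contains,
      PySem.Dict.keys, PySem.Dict.get?] at *
  · simp only [h, not_false_eq_true, if_true]
    simp [PySem.Dict.modify, PySem.Dict.insert, PySem.Dict.getD, PySem.Dict.contains,
      PySem.Dict.keys, PySem.Dict.get?] at *
    have hany : (d.items.any fun p => p.1 == w) = false := by
      simp only [List.any_eq_false]
      intro p hp
      simpa using fun hw => h p.2 (by rw [← hw]; simpa using hp)
    have hfind : (List.find? (fun p => p.1 == w) d.items) = none := by
      rw [List.find?_eq_none]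
      intro p hp
      simpa using fun hw => h p.2 (by rw [← hw]; simpa using hp)
    simp [hany, hfind]

-- A's key loop is a find? over the keys
theorem dup_loopA_eq_find (d : PySem.Dict String Int) (ks : List String) :
    duplicadoLoop d ks = ks.find? (fun k => decide (1 < d.getD k 0)) := by
  induction ks with
  | nil => rfl
  | cons k ks ih =>
      simp only [duplicadoLoop, List.find?, ih]
      by_cases h : 1 < d.getD k 0 <;> simp [h]

-- B's answer scan is a find? over the list followed by strip
theorem dup_scan_eq_find (dups : PySem.Set String) (l : List String) :
    duplicadoScan dups l
      = (l.find? (fun x => decide (PySem.Str.strip x ∈ dups))).map PySem.Str.strip := by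
  induction l with
  | nil => rfl
  | cons a l ih =>
      simp only [duplicadoScan, List.find?, ih]
      by_cases h : PySem.Str.strip a ∈ dups <;> simp [h]

-- find? is unchanged by first-occurrence dedup (first duplicate key = first duplicated element)
theorem dup_find_filter_drop (p : String → Bool) (a : String) (hpa : p a = false)
    (acc : List String) :
    ∀ (s : List String),
      ((s.filter (fun w => !(acc ++ [a]).contains w)).find? p)
        = ((s.filter (fun w => !acc.contains w)).find? p) := by
  intro s
  induction s with
  | nil => rfl
  | cons b s ih =>
      rw [List.filter_cons, List.filter_cons]
      by_cases hb : b = a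
      · subst hb
        rw [if_neg (by simp)]
        by_cases hm : b ∈ acc
        · rw [if_neg (by simp [hm]), ih]
        · rw [if_pos (by simp [hm]), List.find?_cons, hpa, ih]
      · have hc : (!(acc ++ [a]).contains b) = (!acc.contains b) := by simp [hb]
        rw [hc]
        by_cases hm : (!acc.contains b) = true
        · rw [if_pos hm, if_pos hm, List.find?_cons, List.find?_cons]
          cases hpb : p b
          · exact ih
          · rfl
        · rw [if_neg hm, if_neg hm, ih]

theorem dup_find_foldl_add (p : String → Bool) :
    ∀ (s acc : List String),
      (s.foldl PySem.Set.add acc).find? p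
        = ((acc.find? p).or ((s.filter (fun w => !acc.contains w)).find? p)) := by
  intro s
  induction s with
  | nil => intro acc; simp
  | cons a s ih =>
      intro acc
      simp only [List.foldl_cons]
      by_cases h : a ∈ acc
      · rw [show PySem.Set.add acc a = acc by
          simp [PySem.Set.add, PySem.Set.contains_eq_listContains, h]]
        rw [ih, List.filter_cons, if_neg (by simp [h])]
      · rw [show PySem.Set.add acc a = acc ++ [a] by
          simp [PySem.Set.add, PySem.Set.contains_eq_listContains, h]]
        rw [ih, List.find?_append, List.filter_cons, if_pos (by simp [h])]
        cases hpa : p a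
        · rw [dup_find_filter_drop p a hpa acc s]
          simp only [List.find?_cons, hpa, List.find?_nil, Option.or_none]
        · simp only [List.find?_cons, hpa, Option.some_or, Option.or_assoc]

theorem dup_find_ofList (p : String → Bool) (s : List String) :
    (PySem.Set.ofList s).find? p = s.find? p := by
  rw [PySem.Set.ofList_eq_foldl, dup_find_foldl_add]
  simp only [List.find?_nil, Option.none_or]
  congr 1
  induction s with
  | nil => rfl
  | cons a s ih => simp

-- B's first pass: 'seen' holds the stripped words, 'dups' exactly those occurring twice or more
theorem dup_seen_dups_mem (s : List String) :
    (∀ w, (w ∈ (s.foldl (fun (st : PySem.Set String × PySem.Set String) x =>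
        if x ∈ st.1 then (st.1, PySem.Set.add st.2 x) else (PySem.Set.add st.1 x, st.2))
        (PySem.Set.empty, PySem.Set.empty)).1 ↔ w ∈ s))
    ∧ (∀ w, (w ∈ (s.foldl (fun (st : PySem.Set String × PySem.Set String) x =>
        if x ∈ st.1 then (st.1, PySem.Set.add st.2 x) else (PySem.Set.add st.1 x, st.2))
        (PySem.Set.empty, PySem.Set.empty)).2 ↔ 2 ≤ s.count w)) := by
  induction s using List.reverseRecOn with
  | nil => simp [PySem.Set.empty]
  | append_singleton s x ih =>
      obtain ⟨ih1, ih2⟩ := ih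
      rw [List.foldl_append] at *
      simp only [List.foldl_cons, List.foldl_nil]
      by_cases hx : x ∈ (s.foldl (fun (st : PySem.Set String × PySem.Set String) x =>
        if x ∈ st.1 then (st.1, PySem.Set.add st.2 x) else (PySem.Set.add st.1 x, st.2))
        (PySem.Set.empty, PySem.Set.empty)).1
      · have hxs : x ∈ s := (ih1 x).mp hx
        rw [if_pos hx]
        refine ⟨?_, ?_⟩
        · intro w
          rw [ih1 w, List.mem_append, List.mem_singleton]
          constructor
          · exact Or.inl
          · rintro (h | rfl)
            · exact h
            · exact hxs
        · intro w
          rw [PySem.Set.mem_add, ih2 w, List.count_append]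
          have h1 : 1 ≤ s.count x := List.one_le_count_iff.mpr hxs
          by_cases hwx : w = x
          · subst hwx
            simp
            omega
          · have hc : ([x].count w) = 0 := by
              simp [List.count_singleton]; exact fun hh => hwx hh.symm
            rw [hc]
            simp [hwx]
      · have hxs : x ∉ s := fun h => hx ((ih1 x).mpr h)
        rw [if_neg hx]
        refine ⟨?_, ?_⟩
        · intro w
          rw [PySem.Set.mem_add, ih1 w, List.mem_append, List.mem_singleton]
        · intro w
          rw [ih2 w, List.count_append]
          have h0 : s.count x = 0 := List.count_eq_zero.mpr hxs
          by_cases hwx : w = x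
          · subst hwx
            simp [h0]
          · have hc : ([x].count w) = 0 := by
              simp [List.count_singleton]; exact fun hh => hwx hh.symm
            rw [hc]
            omega

-- A in closed form: first element of the stripped list occurring at least twice
theorem dup_A_char (array : List String) :
    duplicado array
      = (array.map PySem.Str.strip).find?
          (fun w => decide (2 ≤ (array.map PySem.Str.strip).count w)) := by
  unfold duplicado
  have hfold : array.foldl
      (fun d linha =>
        let palavra := PySem.Str.strip linha
        if palavra ∉ d.keys then d.insert palavra 1
        else d.insert palavra (d.getD palavra 0 + 1))
      PySem.Dict.empty
      = PySem.Dict.counter (array.map PySem.Str.strip) := by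
    rw [PySem.Dict.counter_eq_foldl, List.foldl_map]
    apply PySem.List.foldl_congr_mem
    intro d linha _
    exact dup_stepA_eq d (PySem.Str.strip linha)
  rw [hfold, dup_loopA_eq_find, PySem.Dict.keys_counter, dup_find_ofList]
  have hp : (fun k => decide (1 < (PySem.Dict.counter (array.map PySem.Str.strip)).getD k 0))
      = (fun w => decide (2 ≤ (array.map PySem.Str.strip).count w)) := by
    funext k
    rw [PySem.Dict.getD_counter, decide_eq_decide]
    omega
  rw [hp]

-- B in the same closed form
theorem dup_B_char (array : List String) :
    duplicado_alt array
      = (array.map PySem.Str.strip).find?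
          (fun w => decide (2 ≤ (array.map PySem.Str.strip).count w)) := by
  unfold duplicado_alt
  rw [dup_scan_eq_find]
  have hfold : array.foldl
      (fun (st : PySem.Set String × PySem.Set String) linha =>
        let palavra := PySem.Str.strip linha
        if palavra ∈ st.1 then (st.1, PySem.Set.add st.2 palavra)
        else (PySem.Set.add st.1 palavra, st.2))
      (PySem.Set.empty, PySem.Set.empty)
      = (array.map PySem.Str.strip).foldl
          (fun (st : PySem.Set String × PySem.Set String) x =>
            if x ∈ st.1 then (st.1, PySem.Set.add st.2 x) else (PySem.Set.add st.1 x, st.2))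
          (PySem.Set.empty, PySem.Set.empty) := by
    rw [List.foldl_map]
  rw [hfold]
  have hdups := (dup_seen_dups_mem (array.map PySem.Str.strip)).2
  have hp : (fun x => decide (PySem.Str.strip x ∈
        ((array.map PySem.Str.strip).foldl
          (fun (st : PySem.Set String × PySem.Set String) x =>
            if x ∈ st.1 then (st.1, PySem.Set.add st.2 x) else (PySem.Set.add st.1 x, st.2))
          (PySem.Set.empty, PySem.Set.empty)).2))
      = (fun x => decide (2 ≤ (array.map PySem.Str.strip).count (PySem.Str.strip x))) := by
    funext x
    rw [decide_eq_decide]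
    exact hdups (PySem.Str.strip x)
  rw [hp, List.find?_map]
  rfl

-- ===== VERDICT (by name: the statement is the Claim_ definition above) =====
theorem duplicado_spec : Claim_equal_duplicado := by
  intro array _
  unfold Spec_duplicado
  rw [dup_A_char, dup_B_char]
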